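-- pv_equiv track=rewrite | github.com/keagud/etymonline_downloader | etymonline_downloader/etymonline_downloader.py | format_pos
-- ===== SOURCE A (Python) =====
-- def format_pos(token: str | None):
--     if token is None:
--         return None
--
--     def strip_nonalnum(t: str):
--         return "".join([c for c in t if c.isalnum()])
--
--     if "," in token:
--         elements = token.split(",")
--         return ", ".join(strip_nonalnum(e) for e in elements)
--
--     return strip_nonalnum(token)
-- ===== SOURCE B (Python) =====
-- def format_pos(token: str | None):
--     if token is None:
--         return None
--     out = []
--     for c in token:
--         if c.isalnum():
--             out.append(c)
--         elif c == ",":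
--             out.append(", ")
--     return "".join(out)
-- ===== Notes on version B (the rewrite author's own statement) =====
-- stated objective: simpler
-- what changed: Replaces the comma-presence branch plus split/strip-per-token/join pipeline by a single character scan that keeps alphanumeric characters, emits a comma-and-space separator for each comma, and drops everything else.
import Mathlib
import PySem

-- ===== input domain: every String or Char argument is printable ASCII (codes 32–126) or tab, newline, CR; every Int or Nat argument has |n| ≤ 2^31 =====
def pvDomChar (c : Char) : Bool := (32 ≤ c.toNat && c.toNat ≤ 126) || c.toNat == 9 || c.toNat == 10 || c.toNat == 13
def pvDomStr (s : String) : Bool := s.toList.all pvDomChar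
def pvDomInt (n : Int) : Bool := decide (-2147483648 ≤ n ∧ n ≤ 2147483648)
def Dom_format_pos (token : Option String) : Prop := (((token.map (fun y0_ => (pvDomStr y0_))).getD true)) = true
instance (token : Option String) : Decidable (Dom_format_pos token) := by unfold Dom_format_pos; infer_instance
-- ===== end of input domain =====

-- B changes A's split/strip/join pipeline into one character scan; objective: simpler.

-- ===== PORT A =====
-- "".join([c for c in t if c.isalnum()])
def fpStripNonalnum (t : List Char) : List Char :=
  PySem.Chars.join [] ((t.filter PySem.Chars.isalnum).map (fun c => [c]))

def format_pos (token : Option String) : Option String :=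
  match token with
  | none => none
  | some s =>
    if PySem.Str.isIn "," s then
      let elements := PySem.Chars.splitOn s.toList [',']
      some (String.ofList (PySem.Chars.join [',', ' '] (elements.map fpStripNonalnum)))
    else
      some (String.ofList (fpStripNonalnum s.toList))

-- ===== PORT B =====
-- one pass: alnum char kept, comma becomes ", ", everything else dropped
def fpStep (out : List Char) (c : Char) : List Char :=
  if PySem.Chars.isalnum c then out ++ [c]
  else if c == ',' then out ++ [',', ' ']
  else out

def format_pos_alt (token : Option String) : Option String :=
  match token with
  | none => none
  | some s => some (String.ofList (s.toList.foldl fpStep []))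

-- ===== PRECONDITION & SPEC =====
def Spec_format_pos (token : Option String) (out : Option String) : Prop := out = format_pos_alt token
instance (token : Option String) (out : Option String) : Decidable (Spec_format_pos token out) := by unfold Spec_format_pos; infer_instance

-- ===== CLAIM (what is proved, stated in full; the proofs are below) =====
def Claim_equal_format_pos : Prop := ∀ (token : Option String), Dom_format_pos token → Spec_format_pos token (format_pos token)

-- ===== LEMMAS AND PROOFS =====

-- proof-side recursive form of B's scan
def fpScan : List Char → List Char
  | [] => []
  | c :: l =>
    (if PySem.Chars.isalnum c then [c] else if c == ',' then [',', ' '] else []) ++ fpScan l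

lemma fpFoldl_eq_scan (l : List Char) (acc : List Char) :
    l.foldl fpStep acc = acc ++ fpScan l := by
  induction l generalizing acc with
  | nil => simp [fpScan]
  | cons c l ih =>
    simp only [List.foldl_cons, fpScan, ih]
    unfold fpStep
    split_ifs <;> simp [List.append_assoc]

-- proof-side recursive form of Python's str.split(",")
def fpSplit (pre : List Char) : List Char → List (List Char)
  | [] => [pre]
  | c :: l => if c == ',' then pre :: fpSplit [] l else fpSplit (pre ++ [c]) l

lemma fpStrip_eq_filter (t : List Char) :
    fpStripNonalnum t = t.filter PySem.Chars.isalnum := by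
  simp [fpStripNonalnum, PySem.Chars.join_nil_singletons (t.filter PySem.Chars.isalnum)]

lemma fpSplit_comma (pre l) : fpSplit pre (',' :: l) = pre :: fpSplit [] l := by
  simp [fpSplit]

lemma fpSplit_other (pre l) {c : Char} (hc : c ≠ ',') :
    fpSplit pre (c :: l) = fpSplit (pre ++ [c]) l := by
  simp [fpSplit, hc]

lemma fpSplit_ne_nil (l : List Char) : ∀ pre, fpSplit pre l ≠ [] := by
  induction l with
  | nil => intro pre; simp [fpSplit]
  | cons c l ih =>
    intro pre
    by_cases hc : c = ','
    · subst hc; simp [fpSplit_comma]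
    · rw [fpSplit_other _ _ hc]; exact ih _

lemma fpSplitOn_go (fuel : Nat) :
    ∀ (l cur : List Char) (acc : List (List Char)), l.length < fuel →
      PySem.Chars.splitOn.go [','] fuel l cur acc = acc.reverse ++ fpSplit cur.reverse l := by
  induction fuel with
  | zero => intro l cur acc h; omega
  | succ fuel ih =>
    intro l cur acc h
    cases l with
    | nil => simp [PySem.Chars.splitOn.go, fpSplit]
    | cons c rest =>
      simp only [PySem.Chars.splitOn.go]
      simp only [List.length_cons] at h
      by_cases hc : c = ','
      · subst hc
        have hp : ([','].isPrefixOf (',' :: rest)) = true := by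
          simp [List.isPrefixOf]
        rw [if_pos hp]
        have hdrop : List.drop [','].length (',' :: rest) = rest := rfl
        rw [hdrop, ih _ _ _ (Nat.lt_of_succ_lt_succ h)]
        simp [fpSplit_comma]
      · have hp : ([','].isPrefixOf (c :: rest)) = false := by
          have hc' : ¬ (',' = c) := fun hh => hc hh.symm
          simp [List.isPrefixOf, hc']
        rw [if_neg (by simp [hp]), ih _ _ _ (Nat.lt_of_succ_lt_succ h)]
        rw [fpSplit_other _ _ hc]
        simp

lemma fpSplitOn_eq (l : List Char) :
    PySem.Chars.splitOn l [','] = fpSplit [] l := by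
  unfold PySem.Chars.splitOn
  simpa using fpSplitOn_go (l.length + 1) l [] [] (by omega)

lemma fpJoin_split_eq_scan (l : List Char) : ∀ pre,
    PySem.Chars.join [',', ' ']
      ((fpSplit pre l).map (fun t => t.filter PySem.Chars.isalnum))
      = pre.filter PySem.Chars.isalnum ++ fpScan l := by
  induction l with
  | nil => intro pre; simp [fpSplit, PySem.Chars.join, List.intercalate, fpScan]
  | cons c l ih =>
    intro pre
    by_cases hc : c = ','
    · subst hc
      rw [fpSplit_comma, List.map_cons]
      obtain ⟨x, xs, hx⟩ : ∃ x xs, fpSplit ([] : List Char) l = x :: xs := by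
        cases h : fpSplit ([] : List Char) l with
        | nil => exact absurd h (fpSplit_ne_nil l [])
        | cons x xs => exact ⟨x, xs, rfl⟩
      have hih := ih []
      rw [hx] at hih ⊢
      rw [List.map_cons] at hih ⊢
      rw [PySem.Chars.join_cons_cons]
      simp only [List.filter_nil, List.nil_append] at hih
      rw [hih]
      have haln : PySem.Chars.isalnum ',' = false := by decide
      simp [fpScan, haln, List.append_assoc]
    · rw [fpSplit_other _ _ hc, ih]
      have hcb : (c == ',') = false := by simp [hc]
      by_cases ha : PySem.Chars.isalnum c <;>
        simp [fpScan, ha, hcb, List.filter_append, List.append_assoc]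

lemma fpScan_of_no_comma (l : List Char) (h : ',' ∉ l) :
    fpScan l = l.filter PySem.Chars.isalnum := by
  induction l with
  | nil => simp [fpScan]
  | cons c l ih =>
    simp only [List.mem_cons, not_or] at h
    have hcb : (c == ',') = false := by
      simp; exact fun hh => h.1 hh.symm
    by_cases ha : PySem.Chars.isalnum c <;>
      simp [fpScan, ha, hcb, ih h.2]

-- ===== VERDICT (by name: the statement is the Claim_ definition above) =====
theorem format_pos_spec : Claim_equal_format_pos := by
  intro token _
  unfold Spec_format_pos
  cases token with
  | none => rfl
  | some s =>
    simp only [format_pos, format_pos_alt]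
    rw [fpFoldl_eq_scan]
    by_cases h : PySem.Str.isIn "," s
    · rw [if_pos h]
      have hm : (PySem.Chars.splitOn s.toList [',']).map fpStripNonalnum
          = (fpSplit [] s.toList).map (fun t => t.filter PySem.Chars.isalnum) := by
        rw [fpSplitOn_eq]
        exact List.map_congr_left (fun t _ => fpStrip_eq_filter t)
      rw [hm, fpJoin_split_eq_scan]
      simp
    · rw [if_neg h]
      have hmem : ',' ∉ s.toList := by
        intro hmm
        apply h
        refine (PySem.Str.isIn_iff_infix _ _).mpr ?_
        have : [','] <:+: s.toList := (List.singleton_infix_iff ',' s.toList).mpr hmm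
        simpa using this
      rw [fpStrip_eq_filter, fpScan_of_no_comma _ hmem]
      simp
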